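-- pv_equiv track=rewrite | github.com/crolvlee/Algorithm | 프로그래머스/2/131704. 택배상자/택배상자.py | solution
-- ===== SOURCE A (Python) =====
-- from collections import deque
--
-- def solution(order):
--     answer = 0
--     main_belt = deque()
--     sub_belt = []
--
--     for i in range(1, len(order) + 1):
--         main_belt.append(i)
--
--     # order 탐색
--     for now in order:
--         if main_belt and main_belt[0] < now:
--             while main_belt and main_belt[0] < now:
--                 front_num = main_belt.popleft()
--                 sub_belt.append(front_num)
--
--         find = False
--
--         if main_belt and main_belt[0] == now:
--             main_belt.popleft()
--             answer += 1
--             find = True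
--         else:
--             if sub_belt and sub_belt[-1] == now:
--                 sub_belt.pop()
--                 answer += 1
--                 find = True
--
--         if find == False:
--             break
--
--
--     return answer
-- ===== SOURCE B (Python) =====
-- def solution(order):
--     n = len(order)
--     delivered = set()   # boxes already taken by the truck
--     m = 0               # boxes 1..m have left the main belt
--     answer = 0
--     for now in order:
--         if now > m:
--             if now > n:
--                 break
--             m = now
--             delivered.add(now)
--             answer += 1
--         else:
--             top = m
--             while top > 0 and top in delivered:
--                 top -= 1
--             if top > 0 and top == now:
--                 delivered.add(now)
--                 answer += 1
--             else:
--                 break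
--     return answer
-- ===== Notes on version B (the rewrite author's own statement) =====
-- stated objective: alternative
-- what changed: Replaces A's materialized deque main belt and sub-belt stack by a watermark m (highest box removed from the main belt) plus a set of delivered boxes; the reachable box is recomputed as the largest undelivered box <= m by scanning downward, so no belt lists are built.
import Mathlib
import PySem

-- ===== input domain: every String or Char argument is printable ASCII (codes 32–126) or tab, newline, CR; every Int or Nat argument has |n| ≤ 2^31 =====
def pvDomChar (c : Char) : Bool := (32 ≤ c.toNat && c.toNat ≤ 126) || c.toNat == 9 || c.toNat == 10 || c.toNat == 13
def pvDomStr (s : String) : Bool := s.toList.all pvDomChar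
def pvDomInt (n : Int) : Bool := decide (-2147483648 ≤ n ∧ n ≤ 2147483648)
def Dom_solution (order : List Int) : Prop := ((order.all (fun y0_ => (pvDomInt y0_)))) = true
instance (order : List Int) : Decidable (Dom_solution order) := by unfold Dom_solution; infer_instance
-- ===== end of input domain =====

-- B replaces A's deque+stack belt simulation by a watermark of removed boxes plus a set of
-- delivered boxes, recomputing the reachable top by a downward scan (objective: alternative).

-- ===== PORT A =====
-- main_belt is a List Int with its front at the head; sub_belt is kept with its TOP at the
-- head (Python appends/pops at the end of the list — push/pop at the head is the same stack).

-- the inner `while main_belt and main_belt[0] < now` loop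
def pvMoveWhile (now : Int) : List Int → List Int → List Int × List Int
  | [], sub => ([], sub)
  | m :: ms, sub => if m < now then pvMoveWhile now ms (m :: sub) else (m :: ms, sub)

-- the `for now in order` loop; returning `ans` without recursing = `break`
def pvLoopA : List Int → List Int → List Int → Int → Int
  | [], _, _, ans => ans
  | now :: rest, main, sub, ans =>
    -- `if main_belt and main_belt[0] < now:` then the while loop (same condition)
    let p := match main with
      | m :: ms => if m < now then pvMoveWhile now (m :: ms) sub else (m :: ms, sub)
      | [] => ([], sub)
    match p with
    | (m :: ms, sub1) =>
      if m = now then pvLoopA rest ms sub1 (ans + 1)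
      else match sub1 with
        | s :: ss => if s = now then pvLoopA rest (m :: ms) ss (ans + 1) else ans
        | [] => ans
    | ([], sub1) =>
      match sub1 with
      | s :: ss => if s = now then pvLoopA rest [] ss (ans + 1) else ans
      | [] => ans

def solution (order : List Int) : Int :=
  pvLoopA order (PySem.List.pyRange 1 ((order.length : Int) + 1) 1) [] 0

-- ===== PORT B =====
-- `top = m; while top > 0 and top in delivered: top -= 1`
def pvScanTop (delivered : PySem.Set Int) (top : Int) : Int :=
  if h : 0 < top ∧ top ∈ delivered then pvScanTop delivered (top - 1) else top
termination_by top.toNat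
decreasing_by omega

-- the `for now in order` loop of B; returning `ans` without recursing = `break`
def pvLoopB (n : Int) : List Int → Int → PySem.Set Int → Int → Int
  | [], _, _, ans => ans
  | now :: rest, m, delivered, ans =>
    if m < now then
      if n < now then ans
      else pvLoopB n rest now (PySem.Set.add delivered now) (ans + 1)
    else
      let top := pvScanTop delivered m
      if 0 < top ∧ top = now then pvLoopB n rest m (PySem.Set.add delivered now) (ans + 1)
      else ans

def solution_alt (order : List Int) : Int :=
  pvLoopB (order.length : Int) order 0 PySem.Set.empty 0

-- ===== PRECONDITION & SPEC =====
def Spec_solution (order : List Int) (out : Int) : Prop := out = solution_alt order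
instance (order : List Int) (out : Int) : Decidable (Spec_solution order out) := by unfold Spec_solution; infer_instance

-- ===== CLAIM (what is proved, stated in full; the proofs are below) =====
def Claim_equal_solution : Prop := ∀ (order : List Int), Dom_solution order → Spec_solution order (solution order)

-- ===== LEMMAS AND PROOFS =====

-- pushSeq a b s = elements a, a+1, …, b-1 pushed (in increasing order) onto s
def pushSeq (a b : Int) (s : List Int) : List Int :=
  if h : a < b then pushSeq (a + 1) b (a :: s) else s
termination_by (b - a).toNat
decreasing_by omega

-- descList p m = the boxes m, m-1, …, 1 not in p (A's sub-belt, top at head)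
def descList (p : PySem.Set Int) (m : Int) : List Int :=
  if h : 0 < m then
    (if m ∈ p then descList p (m - 1) else m :: descList p (m - 1))
  else []
termination_by m.toNat
decreasing_by all_goals omega

lemma pushSeq_of_ge {a b : Int} (h : b ≤ a) (s : List Int) : pushSeq a b s = s := by
  rw [pushSeq]; simp [not_lt.mpr h]

lemma pushSeq_succ : ∀ (a b : Int), a ≤ b → ∀ s, pushSeq a (b + 1) s = b :: pushSeq a b s := by
  intro a b
  induction hk : (b - a).toNat generalizing a with
  | zero =>
    intro hab s
    have hba : a = b := by omega
    subst hba
    rw [pushSeq_of_ge le_rfl, pushSeq]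
    have h : a < a + 1 := by omega
    rw [dif_pos h, pushSeq_of_ge le_rfl]
  | succ k ih =>
    intro hab s
    have h1 : a < b := by omega
    have l1 : pushSeq a (b + 1) s = pushSeq (a + 1) (b + 1) (a :: s) := by
      rw [pushSeq, dif_pos (show a < b + 1 by omega)]
    have l2 : pushSeq a b s = pushSeq (a + 1) b (a :: s) := by
      rw [pushSeq, dif_pos h1]
    rw [l1, l2]
    exact ih (a + 1) (by omega) (by omega) (a :: s)

lemma pushSeq_le {n : Int} : ∀ (a b : Int), b ≤ n + 1 →
    ∀ s : List Int, (∀ x ∈ s, x ≤ n) → ∀ x ∈ pushSeq a b s, x ≤ n := by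
  intro a b
  induction hk : (b - a).toNat generalizing a with
  | zero =>
    intro hb s hs
    rw [pushSeq_of_ge (by omega)]
    exact hs
  | succ k ih =>
    intro hb s hs
    rw [pushSeq, dif_pos (show a < b by omega)]
    refine ih (a + 1) (by omega) hb (a :: s) ?_
    intro x hx
    rcases List.mem_cons.mp hx with h | h
    · omega
    · exact hs x h

lemma descList_nonpos {p : PySem.Set Int} {m : Int} (h : m ≤ 0) : descList p m = [] := by
  rw [descList]; simp [not_lt.mpr h]

lemma descList_mem {p : PySem.Set Int} : ∀ (m : Int), ∀ x ∈ descList p m, 1 ≤ x ∧ x ≤ m := by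
  intro m
  induction hk : m.toNat generalizing m with
  | zero =>
    intro x hx
    rw [descList_nonpos (by omega)] at hx
    simp at hx
  | succ k ih =>
    intro x hx
    rw [descList, dif_pos (show 0 < m by omega)] at hx
    by_cases hm : m ∈ p
    · rw [if_pos hm] at hx
      have := ih (m - 1) (by omega) x hx
      omega
    · rw [if_neg hm] at hx
      rcases List.mem_cons.mp hx with h | h
      · omega
      · have := ih (m - 1) (by omega) x h
        omega

lemma scanTop_eq_headD (p : PySem.Set Int) : ∀ (m : Int), 0 ≤ m →
    pvScanTop p m = (descList p m).headD 0 := by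
  intro m
  induction hk : m.toNat generalizing m with
  | zero =>
    intro hm
    have h0 : m = 0 := by omega
    subst h0
    rw [pvScanTop, descList]
    simp
  | succ k ih =>
    intro hm
    have h0 : 0 < m := by omega
    rw [pvScanTop]
    conv_rhs => rw [descList]
    rw [dif_pos h0]
    by_cases hmem : m ∈ p
    · rw [dif_pos ⟨h0, hmem⟩, if_pos hmem]
      exact ih (m - 1) (by omega) (by omega)
    · rw [dif_neg (by tauto), if_neg hmem]
      rfl

-- membership in p and q agrees below m → equal descLists
lemma descList_congr {p q : PySem.Set Int} :
    ∀ (m : Int), (∀ x : Int, 1 ≤ x → x ≤ m → (x ∈ p ↔ x ∈ q)) →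
    descList p m = descList q m := by
  intro m
  induction hk : m.toNat generalizing m with
  | zero =>
    intro _
    rw [descList_nonpos (by omega), descList_nonpos (by omega)]
  | succ k ih =>
    intro hpq
    have h0 : 0 < m := by omega
    conv_lhs => rw [descList]
    conv_rhs => rw [descList]
    rw [dif_pos h0, dif_pos h0]
    have hm : m ∈ p ↔ m ∈ q := hpq m (by omega) le_rfl
    have htail := ih (m - 1) (by omega) (fun x h1 h2 => hpq x h1 (by omega))
    by_cases hmp : m ∈ p
    · rw [if_pos hmp, if_pos (hm.mp hmp), htail]
    · rw [if_neg hmp, if_neg (fun h => hmp (hm.mpr h)), htail]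

lemma descList_add_gt {p : PySem.Set Int} {c m : Int} (h : m < c) :
    descList (PySem.Set.add p c) m = descList p m := by
  refine descList_congr m (fun x h1 h2 => ?_)
  rw [PySem.Set.mem_add p c x]
  constructor
  · rintro (hx | hx)
    · exact hx
    · omega
  · exact Or.inl

-- popping the reachable top from the sub-belt = adding it to the delivered set
lemma descList_pop {p : PySem.Set Int} :
    ∀ (m t : Int) (ts : List Int), descList p m = t :: ts →
    descList (PySem.Set.add p t) m = ts := by
  intro m
  induction hk : m.toNat generalizing m with
  | zero =>
    intro t ts h
    rw [descList_nonpos (by omega)] at h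
    exact absurd h (by simp)
  | succ k ih =>
    intro t ts h
    have h0 : 0 < m := by omega
    rw [descList, dif_pos h0] at h
    rw [descList, dif_pos h0]
    by_cases hmp : m ∈ p
    · rw [if_pos hmp] at h
      rw [if_pos ((PySem.Set.mem_add p t m).mpr (Or.inl hmp))]
      exact ih (m - 1) (by omega) t ts h
    · rw [if_neg hmp] at h
      obtain ⟨ht, hts⟩ := List.cons_eq_cons.mp h
      subst ht
      rw [if_pos ((PySem.Set.mem_add p m m).mpr (Or.inr rfl)), ← hts]
      exact descList_add_gt (by omega)

-- fast branch: moving boxes mw+1..k across (all undelivered) after delivering c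
lemma descList_extend {p : PySem.Set Int} {mw : Int}
    (hp : ∀ x ∈ p, x ≤ mw) (hm : 0 ≤ mw) :
    ∀ (k : Int), mw ≤ k → ∀ (c : Int), k < c →
    descList (PySem.Set.add p c) k = pushSeq (mw + 1) (k + 1) (descList p mw) := by
  intro k
  induction hk : (k - mw).toNat generalizing k with
  | zero =>
    intro hmk c hkc
    have he : k = mw := by omega
    subst he
    rw [descList_add_gt hkc, pushSeq_of_ge (by omega)]
  | succ j ih =>
    intro hmk c hkc
    have h0 : 0 < k := by omega
    have hknp : k ∉ PySem.Set.add p c := by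
      rw [PySem.Set.mem_add p c k]
      rintro (hx | hx)
      · have := hp k hx; omega
      · omega
    rw [descList, dif_pos h0, if_neg hknp,
      pushSeq_succ (mw + 1) k (by omega)]
    have := ih (k - 1) (by omega) (by omega) c (by omega)
    rw [show k - 1 + 1 = k by omega] at this
    rw [this]

-- delivering box c straight off the main belt
lemma descList_deliver {p : PySem.Set Int} {mw c : Int}
    (hp : ∀ x ∈ p, x ≤ mw) (hm : 0 ≤ mw) (hc : mw < c) :
    descList (PySem.Set.add p c) c = pushSeq (mw + 1) c (descList p mw) := by
  rw [descList, dif_pos (show 0 < c by omega),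
    if_pos ((PySem.Set.mem_add p c c).mpr (Or.inr rfl))]
  have := descList_extend hp hm (c - 1) (by omega) c (by omega)
  rw [show c - 1 + 1 = c by omega] at this
  exact this

-- the inner while loop of A over a range main belt
lemma pvMoveWhile_range (now n : Int) :
    ∀ (a : Int), a ≤ n + 1 →
    ∀ s, pvMoveWhile now (PySem.List.pyRange a (n + 1) 1) s =
      (PySem.List.pyRange (max a (min now (n + 1))) (n + 1) 1, pushSeq a (max a (min now (n + 1))) s) := by
  intro a
  induction hk : (n + 1 - a).toNat generalizing a with
  | zero =>
    intro ha s
    have he : a = n + 1 := by omega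
    subst he
    have hmax : max (n + 1) (min now (n + 1)) = n + 1 := by omega
    rw [PySem.List.pyRange_one_eq_nil le_rfl, hmax, pushSeq_of_ge le_rfl]
    rw [pvMoveWhile, PySem.List.pyRange_one_eq_nil le_rfl]
  | succ k ih =>
    intro ha s
    have h1 : a < n + 1 := by omega
    rw [PySem.List.pyRange_one_cons h1, pvMoveWhile]
    by_cases hlt : a < now
    · have hmax : max a (min now (n + 1)) = min now (n + 1) := by omega
      have hmax2 : max (a + 1) (min now (n + 1)) = min now (n + 1) := by omega
      rw [if_pos hlt, ih (a + 1) (by omega) (by omega), hmax, hmax2]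
      have hps : pushSeq a (min now (n + 1)) s = pushSeq (a + 1) (min now (n + 1)) (a :: s) := by
        rw [pushSeq, dif_pos (show a < min now (n + 1) by omega)]
      rw [← hps]
    · have hmax : max a (min now (n + 1)) = a := by omega
      rw [if_neg hlt, hmax, pushSeq_of_ge le_rfl, ← PySem.List.pyRange_one_cons h1]

lemma stepA_eq (now : Int) (main sub : List Int) :
    (match main with
      | m :: ms => if m < now then pvMoveWhile now (m :: ms) sub else (m :: ms, sub)
      | [] => ([], sub)) = pvMoveWhile now main sub := by
  cases main with
  | nil => simp [pvMoveWhile]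
  | cons m ms =>
    by_cases h : m < now <;> simp [h, pvMoveWhile]

lemma loop_eq (n : Int) :
    ∀ (rest : List Int) (m : Int) (p : PySem.Set Int) (ans : Int),
      0 ≤ m → m ≤ n → (∀ x ∈ p, 1 ≤ x ∧ x ≤ m) →
      pvLoopA rest (PySem.List.pyRange (m + 1) (n + 1) 1) (descList p m) ans
        = pvLoopB n rest m p ans := by
  intro rest
  induction rest with
  | nil => intro m p ans _ _ _; rfl
  | cons now rest ih =>
    intro m p ans hm0 hmn hp
    simp only [pvLoopA, pvLoopB, stepA_eq]
    rw [pvMoveWhile_range now n (m + 1) (by omega)]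
    by_cases h1 : m < now
    · rw [if_pos h1]
      by_cases h2 : n < now
      · -- now beyond the belt: everything crosses, tops ≤ n < now, both break
        rw [if_pos h2]
        have ht : max (m + 1) (min now (n + 1)) = n + 1 := by omega
        rw [ht, PySem.List.pyRange_one_eq_nil le_rfl]
        have hall : ∀ x ∈ pushSeq (m + 1) (n + 1) (descList p m), x ≤ n := by
          refine pushSeq_le (m + 1) (n + 1) le_rfl _ (fun x hx => ?_)
          have := descList_mem m x hx
          omega
        cases hps : pushSeq (m + 1) (n + 1) (descList p m) with
        | nil => simp
        | cons s ss =>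
          have hs : s ≤ n := hall s (by rw [hps]; exact List.mem_cons_self)
          simp only
          rw [if_neg (show ¬ s = now by omega)]
      · -- the wanted box is still on the belt: A pops it from main, B delivers it directly
        rw [if_neg h2]
        have ht : max (m + 1) (min now (n + 1)) = now := by omega
        rw [ht, PySem.List.pyRange_one_cons (show now < n + 1 by omega)]
        simp only [reduceIte]
        have hinv : ∀ x ∈ PySem.Set.add p now, 1 ≤ x ∧ x ≤ now := by
          intro x hx
          rcases (PySem.Set.mem_add p now x).mp hx with hx | hx
          · have := hp x hx; omega
          · omega
        have hdl : descList (PySem.Set.add p now) now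
            = pushSeq (m + 1) now (descList p m) :=
          descList_deliver (fun x hx => (hp x hx).2) hm0 h1
        rw [← hdl]
        exact ih now (PySem.Set.add p now) (ans + 1) (by omega) (by omega) hinv
    · -- now ≤ m: nothing moves; A checks the sub-belt top, B the downward scan
      rw [if_neg h1]
      have ht : max (m + 1) (min now (n + 1)) = m + 1 := by omega
      rw [ht, pushSeq_of_ge le_rfl]
      have hscan : pvScanTop p m = (descList p m).headD 0 := scanTop_eq_headD p m hm0
      cases hdp : descList p m with
      | nil =>
        rw [hscan, hdp]
        simp only [List.headD]
        rw [if_neg (by omega)]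
        cases hrg : PySem.List.pyRange (m + 1) (n + 1) 1 with
        | nil => rfl
        | cons r rs =>
          have hr : r = m + 1 := by
            by_cases h3 : m + 1 < n + 1
            · rw [PySem.List.pyRange_one_cons h3] at hrg
              exact (List.cons_eq_cons.mp hrg).1.symm
            · rw [PySem.List.pyRange_one_eq_nil (by omega)] at hrg
              exact absurd hrg (by simp)
          simp only
          rw [if_neg (by omega)]
      | cons t ts =>
        have htmem := descList_mem (p := p) m t (by rw [hdp]; exact List.mem_cons_self)
        rw [hscan, hdp]
        simp only [List.headD]
        have hstep : ∀ main1 : List Int,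
            (∀ r ∈ main1, ¬ r = now) →
            (match (main1, t :: ts) with
              | (mh :: ms, sub1) =>
                if mh = now then pvLoopA rest ms sub1 (ans + 1)
                else match sub1 with
                  | s :: ss => if s = now then pvLoopA rest (mh :: ms) ss (ans + 1) else ans
                  | [] => ans
              | ([], sub1) =>
                match sub1 with
                | s :: ss => if s = now then pvLoopA rest [] ss (ans + 1) else ans
                | [] => ans) =
            if t = now then pvLoopA rest main1 ts (ans + 1) else ans := by
          intro main1 hmain
          cases main1 with
          | nil => rfl
          | cons r rs =>
            simp only
            rw [if_neg (hmain r List.mem_cons_self)]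
        rw [hstep (PySem.List.pyRange (m + 1) (n + 1) 1)
          (fun r hr => by
            have := (PySem.List.mem_pyRange_one).mp hr
            omega)]
        by_cases h4 : t = now
        · rw [if_pos h4, if_pos ⟨by omega, h4⟩]
          have hinv : ∀ x ∈ PySem.Set.add p now, 1 ≤ x ∧ x ≤ m := by
            intro x hx
            rcases (PySem.Set.mem_add p now x).mp hx with hx | hx
            · exact hp x hx
            · subst hx; omega
          have hpop := descList_pop m t ts hdp
          rw [h4] at hpop
          rw [← hpop]
          exact ih m (PySem.Set.add p now) (ans + 1) hm0 hmn hinv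
        · rw [if_neg h4, if_neg (by tauto)]

-- ===== VERDICT (by name: the statement is the Claim_ definition above) =====
theorem solution_spec : Claim_equal_solution := by
  intro order _
  unfold Spec_solution solution solution_alt
  have h := loop_eq (order.length : Int) order 0 PySem.Set.empty 0 le_rfl (by omega) (by simp [PySem.Set.empty])
  rw [descList_nonpos le_rfl] at h
  rw [show (0 : Int) + 1 = 1 by norm_num] at h
  exact h
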